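-- pv_equiv track=rewrite | github.com/infinite-Joy/predictit | project_cricbuz/test.py | rm_spcl
-- ===== SOURCE A (Python) =====
-- def rm_spcl(string):
--     out_string = ''
--     for c in string:
--         if not c.isalnum():
--             out_string += ' '
--         else:
--             out_string += c
--     out_string = out_string.strip().split()
--     temp = out_string
--     for val in out_string[:]:
--         if val.upper() in ['STADIUM', 'ASSOCIATION', 'GROUND', 'CLUB', 'CRICKET', 'SPORTS', 'PARK', 'NATIONAL', 'THE']:
--             out_string.remove(val)
--     return out_string
-- ===== SOURCE B (Python) =====
-- _KEYWORDS = {'STADIUM', 'ASSOCIATION', 'GROUND', 'CLUB', 'CRICKET', 'SPORTS', 'PARK', 'NATIONAL', 'THE'}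
--
-- def rm_spcl(string):
--     # single scan: collect maximal runs of alphanumeric characters, keep non-keyword ones
--     words = []
--     i, n = 0, len(string)
--     while i < n:
--         if string[i].isalnum():
--             j = i
--             while j < n and string[j].isalnum():
--                 j += 1
--             words.append(string[i:j])
--             i = j
--         else:
--             i += 1
--     return [w for w in words if w.upper() not in _KEYWORDS]
-- ===== Notes on version B (the rewrite author's own statement) =====
-- stated objective: alternative
-- what changed: Single index-scan tokenizer that slices maximal alphanumeric runs out of the string directly and filters them with one set-membership pass, instead of building a space-normalized copy character by character, stripping/splitting it, and repeatedly calling list.remove while iterating a copy of the word list.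
import Mathlib
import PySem

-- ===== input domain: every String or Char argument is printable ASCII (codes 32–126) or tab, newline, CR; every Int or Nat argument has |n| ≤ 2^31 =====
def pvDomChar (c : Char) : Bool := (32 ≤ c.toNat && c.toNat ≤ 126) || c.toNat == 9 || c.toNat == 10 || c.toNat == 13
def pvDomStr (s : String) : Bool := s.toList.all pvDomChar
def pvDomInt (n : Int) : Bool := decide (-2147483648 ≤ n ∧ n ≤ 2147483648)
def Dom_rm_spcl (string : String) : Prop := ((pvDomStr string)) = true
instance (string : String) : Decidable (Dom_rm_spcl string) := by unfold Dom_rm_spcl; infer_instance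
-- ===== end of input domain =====

-- B is a single index-scan tokenizer + one filter pass, replacing A's normalized-copy build, strip/split and repeated list.remove loop.
-- ===== PORT A =====
-- A's inline keyword list
def pvKw : List (List Char) :=
  ["STADIUM".toList, "ASSOCIATION".toList, "GROUND".toList, "CLUB".toList,
   "CRICKET".toList, "SPORTS".toList, "PARK".toList, "NATIONAL".toList, "THE".toList]

def rm_spcl (string : String) : List String :=
  -- out_string built char by char: space for non-alnum, the char otherwise
  let out0 : List Char :=
    string.toList.foldl
      (fun acc c => if !PySem.Chars.isalnum c then acc ++ [' '] else acc ++ [c]) []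
  -- out_string = out_string.strip().split()
  let words : List (List Char) := PySem.Chars.split₀ (PySem.Chars.strip out0)
  -- for val in out_string[:]: if val.upper() in [...]: out_string.remove(val)
  -- (list.remove never raises here: each removal consumes exactly one occurrence of val; getD is unreachable)
  let res : List (List Char) :=
    words.foldl
      (fun cur val =>
        if PySem.Chars.upper val ∈ pvKw then (PySem.List.remove? cur val).getD cur else cur)
      words
  res.map (fun w => String.ofList w)

-- ===== PORT B =====
-- B's keyword set
def pvKwSet : PySem.Set (List Char) :=
  PySem.Set.ofList
    ["STADIUM".toList, "ASSOCIATION".toList, "GROUND".toList, "CLUB".toList,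
     "CRICKET".toList, "SPORTS".toList, "PARK".toList, "NATIONAL".toList, "THE".toList]

-- the index scan of Source B: a maximal alnum run (inner while = takeWhile) then continue past it
def pvWordsB : List Char → List (List Char)
  | [] => []
  | c :: cs =>
    if PySem.Chars.isalnum c then
      (c :: cs.takeWhile PySem.Chars.isalnum) :: pvWordsB (cs.dropWhile PySem.Chars.isalnum)
    else
      pvWordsB cs
termination_by cs => cs.length
decreasing_by
  · exact Nat.lt_succ_of_le (List.length_dropWhile_le _ _)
  · exact Nat.lt_succ_self _

def rm_spcl_alt (string : String) : List String :=
  ((pvWordsB string.toList).filter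
      (fun w => !(PySem.Set.contains pvKwSet (PySem.Chars.upper w)))).map
    (fun w => String.ofList w)

-- ===== PRECONDITION & SPEC =====
def Spec_rm_spcl (string : String) (out : List String) : Prop := out = rm_spcl_alt string
instance (string : String) (out : List String) : Decidable (Spec_rm_spcl string out) := by unfold Spec_rm_spcl; infer_instance

-- ===== CLAIM (what is proved, stated in full; the proofs are below) =====
def Claim_equal_rm_spcl : Prop := ∀ (string : String), Dom_rm_spcl string → Spec_rm_spcl string (rm_spcl string)

-- ===== LEMMAS AND PROOFS =====

-- the whitespace-run tokenizer that split₀ computes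
def pvWordsBy (p : Char → Bool) : List Char → List (List Char)
  | [] => []
  | c :: cs =>
    if p c then pvWordsBy p cs
    else (c :: cs.takeWhile (fun x => !p x)) :: pvWordsBy p (cs.dropWhile (fun x => !p x))
termination_by cs => cs.length
decreasing_by
  · exact Nat.lt_succ_self _
  · exact Nat.lt_succ_of_le (List.length_dropWhile_le _ _)

theorem pv_go_spec (p : Char → Bool) : ∀ (s cur : List Char) (acc : List (List Char)) (_ : p = PySem.Chars.isspace),
    PySem.Chars.split₀.go s cur acc =
      acc.reverse ++
        (if cur.isEmpty then pvWordsBy p s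
         else (cur.reverse ++ s.takeWhile (fun x => !p x)) :: pvWordsBy p (s.dropWhile (fun x => !p x))) := by
  intro s
  induction s with
  | nil =>
    intro cur acc hp
    cases cur <;> simp [PySem.Chars.split₀.go, pvWordsBy]
  | cons c rest ih =>
    intro cur acc hp
    subst hp
    by_cases hc : PySem.Chars.isspace c
    · cases cur with
      | nil =>
        simp [PySem.Chars.split₀.go, hc, ih _ _ rfl, pvWordsBy]
      | cons a as =>
        simp [PySem.Chars.split₀.go, hc, ih _ _ rfl, pvWordsBy]
    · cases cur with
      | nil =>
        simp [PySem.Chars.split₀.go, hc, ih _ _ rfl, pvWordsBy, List.takeWhile, List.dropWhile]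
      | cons a as =>
        simp [PySem.Chars.split₀.go, hc, ih _ _ rfl, List.takeWhile, List.dropWhile]

theorem pv_split₀_eq (s : List Char) :
    PySem.Chars.split₀ s = pvWordsBy PySem.Chars.isspace s := by
  have h := pv_go_spec PySem.Chars.isspace s [] [] rfl
  simpa [PySem.Chars.split₀] using h

theorem pv_wordsBy_lstrip (p : Char → Bool) (s : List Char) :
    pvWordsBy p (s.dropWhile p) = pvWordsBy p s := by
  induction s with
  | nil => rfl
  | cons c cs ih =>
    by_cases hc : p c
    · simp [List.dropWhile, hc, ih, pvWordsBy]
    · simp [List.dropWhile, hc]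

theorem pv_takeWhile_append_junk (p : Char → Bool) (s t : List Char)
    (ht : ∀ c ∈ t, p c) : (s ++ t).takeWhile (fun x => !p x) = s.takeWhile (fun x => !p x) := by
  induction s with
  | nil =>
    cases t with
    | nil => rfl
    | cons a as => simp [List.takeWhile, ht a (by simp)]
  | cons c cs ih =>
    by_cases hc : p c <;> simp [List.takeWhile, hc, ih]

theorem pv_dropWhile_append_junk (p : Char → Bool) (s t : List Char)
    (ht : ∀ c ∈ t, p c) : (s ++ t).dropWhile (fun x => !p x) = s.dropWhile (fun x => !p x) ++ t := by
  induction s with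
  | nil =>
    cases t with
    | nil => rfl
    | cons a as => simp [List.dropWhile, ht a (by simp)]
  | cons c cs ih =>
    by_cases hc : p c <;> simp [List.dropWhile, hc, ih]

theorem pv_wordsBy_append_junk (p : Char → Bool) : ∀ (n : Nat) (s t : List Char),
    s.length ≤ n → (∀ c ∈ t, p c) → pvWordsBy p (s ++ t) = pvWordsBy p s := by
  intro n
  induction n with
  | zero =>
    intro s t hs ht
    have : s = [] := List.eq_nil_of_length_eq_zero (Nat.le_zero.mp hs)
    subst this
    simp only [List.nil_append]
    induction t with
    | nil => rfl
    | cons a as iht =>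
      simp [pvWordsBy, ht a (by simp), iht (fun c hc => ht c (by simp [hc]))]
  | succ n ih =>
    intro s t hs ht
    cases s with
    | nil => exact ih [] t (Nat.zero_le _) ht
    | cons c cs =>
      have hcs : cs.length ≤ n := by simp at hs; omega
      by_cases hc : p c
      · simp only [List.cons_append, pvWordsBy, hc, if_pos]
        exact ih cs t hcs ht
      · simp only [List.cons_append, pvWordsBy, hc, Bool.false_eq_true, if_false]
        rw [pv_takeWhile_append_junk p cs t ht, pv_dropWhile_append_junk p cs t ht,
          ih (cs.dropWhile (fun x => !p x)) t
            (Nat.le_trans (List.length_dropWhile_le _ _) hcs) ht]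

theorem pv_wordsBy_strip (p : Char → Bool) (s : List Char) (hp : p = PySem.Chars.isspace) :
    pvWordsBy p (PySem.Chars.strip s) = pvWordsBy p s := by
  subst hp
  unfold PySem.Chars.strip PySem.Chars.rstrip PySem.Chars.lstrip
  set p := PySem.Chars.isspace
  set s' := s.dropWhile p with hs'
  have hsplit : s' = (s'.reverse.dropWhile p).reverse ++ (s'.reverse.takeWhile p).reverse := by
    rw [← List.reverse_append, List.takeWhile_append_dropWhile]
    · simp
  have hjunk : ∀ c ∈ (s'.reverse.takeWhile p).reverse, p c := by
    intro c hc
    exact List.mem_takeWhile_imp (by simpa using hc)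
  calc pvWordsBy p (s'.reverse.dropWhile p).reverse
      = pvWordsBy p ((s'.reverse.dropWhile p).reverse ++ (s'.reverse.takeWhile p).reverse) :=
        (pv_wordsBy_append_junk p _ _ _ (Nat.le_refl _) hjunk).symm
    _ = pvWordsBy p s' := by rw [← hsplit]
    _ = pvWordsBy p s := pv_wordsBy_lstrip p s

-- alnum characters are never whitespace (both are explicit code-point ranges)
theorem pv_alnum_not_space (c : Char) (h : PySem.Chars.isalnum c = true) :
    PySem.Chars.isspace c = false := by
  have hn : (48 ≤ c.toNat ∧ c.toNat ≤ 57) ∨ (65 ≤ c.toNat ∧ c.toNat ≤ 90) ∨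
      (97 ≤ c.toNat ∧ c.toNat ≤ 122) := by
    simp only [PySem.Chars.isalnum, PySem.Chars.isalpha, PySem.Chars.isdigit,
      PySem.Chars.isupper, PySem.Chars.islower, Bool.or_eq_true, Bool.and_eq_true,
      decide_eq_true_eq] at h
    rcases h with (⟨h1, h2⟩ | ⟨h1, h2⟩) | ⟨h1, h2⟩
    · exact Or.inr (Or.inl ⟨UInt32.le_iff_toNat_le.mp h1, UInt32.le_iff_toNat_le.mp h2⟩)
    · exact Or.inr (Or.inr ⟨UInt32.le_iff_toNat_le.mp h1, UInt32.le_iff_toNat_le.mp h2⟩)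
    · exact Or.inl ⟨UInt32.le_iff_toNat_le.mp h1, UInt32.le_iff_toNat_le.mp h2⟩
  simp only [PySem.Chars.isspace, Bool.or_eq_false_iff, Bool.and_eq_false_iff,
    decide_eq_false_iff_not]
  omega

-- the normalization map of A
def pvF (c : Char) : Char := if !PySem.Chars.isalnum c then ' ' else c

theorem pv_space_isspace : PySem.Chars.isspace ' ' = true := by decide

theorem pv_takeWhile_map_f (cs : List Char) :
    (cs.map pvF).takeWhile (fun x => !PySem.Chars.isspace x) =
      cs.takeWhile PySem.Chars.isalnum := by
  induction cs with
  | nil => rfl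
  | cons c cs ih =>
    by_cases h : PySem.Chars.isalnum c
    · have hsp := pv_alnum_not_space c h
      simp [pvF, h, hsp, ih]
    · simp [pvF, h, pv_space_isspace]

theorem pv_dropWhile_map_f (cs : List Char) :
    (cs.map pvF).dropWhile (fun x => !PySem.Chars.isspace x) =
      (cs.dropWhile PySem.Chars.isalnum).map pvF := by
  induction cs with
  | nil => rfl
  | cons c cs ih =>
    by_cases h : PySem.Chars.isalnum c
    · have hsp := pv_alnum_not_space c h
      simp [pvF, h, hsp, ih]
    · simp [pvF, h, pv_space_isspace]

theorem pv_wordsBy_map_f : ∀ (n : Nat) (cs : List Char), cs.length ≤ n →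
    pvWordsBy PySem.Chars.isspace (cs.map pvF) = pvWordsB cs := by
  intro n
  induction n with
  | zero =>
    intro cs hcs
    have : cs = [] := List.eq_nil_of_length_eq_zero (Nat.le_zero.mp hcs)
    subst this; simp [pvWordsBy, pvWordsB]
  | succ n ih =>
    intro cs hcs
    cases cs with
    | nil => simp [pvWordsBy, pvWordsB]
    | cons c cs =>
      by_cases h : PySem.Chars.isalnum c
      · have hfc : pvF c = c := by simp [pvF, h]
        have hsp : PySem.Chars.isspace c = false := pv_alnum_not_space c h
        simp only [List.map_cons, pvWordsBy, hsp, Bool.false_eq_true, if_false, hfc,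
          pv_takeWhile_map_f, pv_dropWhile_map_f, pvWordsB, h, if_pos]
        congr 1
        exact ih _ (Nat.le_trans (List.length_dropWhile_le _ _) (Nat.le_of_succ_le_succ hcs))
      · have hfc : pvF c = ' ' := by simp [pvF, h]
        simp only [List.map_cons, pvWordsBy, hfc, pv_space_isspace, if_pos, pvWordsB, h,
          Bool.false_eq_true, if_false]
        exact ih cs (Nat.le_of_succ_le_succ hcs)

-- the removal loop of A: iterating a copy and calling remove on every keyword hit IS a filter
theorem pv_remove_loop (P : List Char → Bool) :
    ∀ (l kept : List (List Char)), (∀ x ∈ kept, P x = false) →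
      l.foldl (fun cur val => if P val then (PySem.List.remove? cur val).getD cur else cur)
          (kept ++ l) =
        kept ++ l.filter (fun x => !P x) := by
  intro l
  induction l with
  | nil => intro kept _; simp
  | cons val rest ih =>
    intro kept hkept
    by_cases hv : P val
    · have hnv : val ∉ kept := fun hm => by simp [hkept val hm] at hv
      have hmem : val ∈ kept ++ val :: rest := by simp
      have hrm : (PySem.List.remove? (kept ++ val :: rest) val).getD (kept ++ val :: rest) =
          kept ++ rest := by
        rw [PySem.List.remove?_eq_some_erase _ _ hmem]
        simp [List.erase_append_right _ hnv]
      simp only [List.foldl_cons, hv, if_pos, hrm]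
      simpa [hv] using ih kept hkept
    · have hkept' : ∀ x ∈ kept ++ [val], P x = false := by
        intro x hx
        rcases List.mem_append.mp hx with h | h
        · exact hkept x h
        · simp at h; subst h; simpa using hv
      have := ih (kept ++ [val]) hkept'
      simp only [List.foldl_cons, hv, Bool.false_eq_true, if_false]
      simp only [List.append_assoc, List.singleton_append] at this
      rw [this]
      simp [hv]

theorem pv_mem_set (w : List Char) :
    PySem.Set.contains pvKwSet w = decide (w ∈ pvKw) := by
  unfold pvKwSet
  rw [show (PySem.Set.ofList
      ["STADIUM".toList, "ASSOCIATION".toList, "GROUND".toList, "CLUB".toList,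
       "CRICKET".toList, "SPORTS".toList, "PARK".toList, "NATIONAL".toList, "THE".toList]
      : PySem.Set (List Char)) = pvKw from by decide]
  simp [PySem.Set.contains]

-- ===== VERDICT (by name: the statement is the Claim_ definition above) =====
theorem rm_spcl_spec : Claim_equal_rm_spcl := by
  intro s _
  unfold Spec_rm_spcl rm_spcl rm_spcl_alt
  have hstep : (fun (acc : List Char) (c : Char) =>
      if !PySem.Chars.isalnum c then acc ++ [' '] else acc ++ [c]) =
      fun acc c => acc ++ [pvF c] := by
    funext acc c
    by_cases h : PySem.Chars.isalnum c <;> simp [pvF, h]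
  rw [hstep, PySem.List.foldl_append_singleton_eq_map]
  simp only [List.nil_append]
  rw [pv_split₀_eq, pv_wordsBy_strip _ _ rfl,
    pv_wordsBy_map_f s.toList.length s.toList (Nat.le_refl _)]
  rw [show (pvWordsB s.toList).foldl
        (fun cur val => if PySem.Chars.upper val ∈ pvKw then
          (PySem.List.remove? cur val).getD cur else cur) (pvWordsB s.toList) =
      (pvWordsB s.toList).filter (fun x => !decide (PySem.Chars.upper x ∈ pvKw)) from by
    simpa using pv_remove_loop (fun x => decide (PySem.Chars.upper x ∈ pvKw))
      (pvWordsB s.toList) [] (by simp)]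
  congr 1
  apply List.filter_congr
  intro w _
  rw [pv_mem_set]
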